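-- pv_equiv track=rewrite | github.com/atuizz/baidupan-cli | src/bdpan_wrapper/cli.py | normalize_legacy_argv
-- ===== SOURCE A (Python) =====
-- def normalize_legacy_argv(argv: list[str]) -> list[str]:
--     if not argv:
--         return argv
--
--     global_args: list[str] = []
--     remaining = list(argv)
--     while "-c" in remaining or "--config" in remaining:
--         flag = "-c" if "-c" in remaining else "--config"
--         index = remaining.index(flag)
--         try:
--             value = remaining[index + 1]
--         except IndexError as exc:
--             raise SystemExit(f"missing value for {flag}") from exc
--         global_args.extend([flag, value])
--         del remaining[index:index + 2]
--
--     head, *tail = remaining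
--     if head == "account-bind-start":
--         return global_args + ["bind", "start", "--name", _pop_value(tail, "--display-name")]
--     if head == "account-bind-complete":
--         return global_args + [
--             "bind",
--             "complete",
--             "--account-id",
--             _pop_value(tail, "--account-id"),
--             "--code",
--             _pop_value(tail, "--auth-code"),
--         ]
--     if head == "account-check":
--         return global_args + ["account", "user", "--account-id", _pop_value(tail, "--account-id")]
--     if head == "account-list":
--         return global_args + ["account", "list"]
--     if head == "upload-share":
--         return global_args + [
--             "upload",
--             _pop_value(tail, "--local-path"),
--             _pop_value(tail, "--remote-path"),
--             "--account-id",
--             _pop_value(tail, "--account-id"),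
--         ]
--     if head == "transfer-share":
--         normalized = [
--             "transfer",
--             _pop_value(tail, "--share-url"),
--             _pop_value(tail, "--save-path") if "--save-path" in tail else "",
--             "--account-id",
--             _pop_value(tail, "--account-id"),
--         ]
--         if "--password" in tail:
--             normalized.extend(["--pwd", _pop_value(tail, "--password")])
--         return global_args + [item for item in normalized if item != ""]
--     if head == "serve-api":
--         normalized = ["api", "serve"]
--         if "--host" in tail:
--             normalized.extend(["--host", _pop_value(tail, "--host")])
--         if "--port" in tail:
--             normalized.extend(["--port", _pop_value(tail, "--port")])
--         return global_args + normalized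
--     return global_args + remaining
--
-- def _pop_value(args: list[str], flag: str) -> str:
--     if flag not in args:
--         raise SystemExit(f"legacy command missing required flag: {flag}")
--     index = args.index(flag)
--     try:
--         return args[index + 1]
--     except IndexError as exc:
--         raise SystemExit(f"legacy command missing value for {flag}") from exc
-- ===== SOURCE B (Python) =====
-- _SPECS = {
--     "account-bind-start": (
--         [("lit", "bind"), ("lit", "start"), ("lit", "--name"), ("req", "--display-name")],
--         False,
--     ),
--     "account-bind-complete": (
--         [("lit", "bind"), ("lit", "complete"), ("lit", "--account-id"),
--          ("req", "--account-id"), ("lit", "--code"), ("req", "--auth-code")],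
--         False,
--     ),
--     "account-check": (
--         [("lit", "account"), ("lit", "user"), ("lit", "--account-id"), ("req", "--account-id")],
--         False,
--     ),
--     "account-list": ([("lit", "account"), ("lit", "list")], False),
--     "upload-share": (
--         [("lit", "upload"), ("req", "--local-path"), ("req", "--remote-path"),
--          ("lit", "--account-id"), ("req", "--account-id")],
--         False,
--     ),
--     "transfer-share": (
--         [("lit", "transfer"), ("req", "--share-url"), ("optval", "--save-path"),
--          ("lit", "--account-id"), ("req", "--account-id"), ("optpair", "--pwd", "--password")],
--         True,
--     ),
--     "serve-api": (
--         [("lit", "api"), ("lit", "serve"),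
--          ("optpair", "--host", "--host"), ("optpair", "--port", "--port")],
--         False,
--     ),
-- }
--
--
-- def _split_flag(args, flag):
--     """One forward pass: collect [flag, value, ...] pairs, return (pairs, rest)."""
--     pairs, rest, i, n = [], [], 0, len(args)
--     while i < n:
--         if args[i] == flag:
--             if i + 1 >= n:
--                 raise SystemExit(f"missing value for {flag}")
--             pairs.extend([flag, args[i + 1]])
--             i += 2
--         else:
--             rest.append(args[i])
--             i += 1
--     return pairs, rest
--
--
-- def _value_after(args, flag):
--     for i, tok in enumerate(args):
--         if tok == flag:
--             if i + 1 < len(args):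
--                 return args[i + 1]
--             raise SystemExit(f"legacy command missing value for {flag}")
--     raise SystemExit(f"legacy command missing required flag: {flag}")
--
--
-- def _render(tail, tok):
--     kind = tok[0]
--     if kind == "lit":
--         return [tok[1]]
--     if kind == "req":
--         return [_value_after(tail, tok[1])]
--     if kind == "optval":
--         return [_value_after(tail, tok[1])] if tok[1] in tail else []
--     return [tok[1], _value_after(tail, tok[2])] if tok[2] in tail else []
--
--
-- def normalize_legacy_argv(argv: list[str]) -> list[str]:
--     if not argv:
--         return argv
--     c_pairs, rest = _split_flag(argv, "-c")
--     cfg_pairs, remaining = _split_flag(rest, "--config")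
--     if not remaining:
--         raise SystemExit("missing command")
--     head, tail = remaining[0], remaining[1:]
--     spec = _SPECS.get(head)
--     if spec is None:
--         return c_pairs + cfg_pairs + remaining
--     tokens, filt = spec
--     items = [x for tok in tokens for x in _render(tail, tok)]
--     if filt:
--         items = [x for x in items if x != ""]
--     return c_pairs + cfg_pairs + items
-- ===== Notes on version B (the rewrite author's own statement) =====
-- stated objective: alternative
-- what changed: The repeated `in`/`.index`/slice-delete while-loop for extracting -c/--config is replaced by one single forward pass per flag, and the entire hand-written seven-branch dispatch if-chain is replaced by a declarative token-spec table (literal / required-flag / optional-value / optional-pair tokens) evaluated by a single interpreter with one empty-string filter flag.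
import Mathlib
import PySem

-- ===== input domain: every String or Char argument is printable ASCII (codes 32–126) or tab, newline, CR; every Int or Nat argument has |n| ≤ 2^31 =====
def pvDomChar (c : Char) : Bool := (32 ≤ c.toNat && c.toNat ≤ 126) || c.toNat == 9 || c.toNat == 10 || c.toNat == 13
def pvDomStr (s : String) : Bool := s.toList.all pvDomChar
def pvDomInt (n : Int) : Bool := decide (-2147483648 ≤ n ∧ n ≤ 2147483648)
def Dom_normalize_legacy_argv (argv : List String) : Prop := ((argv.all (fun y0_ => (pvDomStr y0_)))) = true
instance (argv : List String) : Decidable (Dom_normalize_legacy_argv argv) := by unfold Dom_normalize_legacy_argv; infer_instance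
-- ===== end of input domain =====

-- B replaces A's repeated `in`/`.index`/`del` config-extraction loop with one forward scan per
-- flag and replaces the whole hand-written dispatch if-chain by a declarative token-spec table
-- interpreted by a single renderer; return values are proved identical wherever A returns
-- (Pre_ excludes exactly the inputs where A raises).

-- ===== PORT A =====
-- Option result: `none` is exactly where the Python raises (SystemExit / ValueError).

-- _pop_value(args, flag)
def pyPopValue (args : List String) (flag : String) : Option String :=
  if flag ∈ args then
    match PySem.List.index? args flag with
    | some idx => PySem.List.pyGet? args ((idx : Int) + 1)   -- none = IndexError → SystemExit
    | none => none
  else none                                                  -- raise SystemExit (flag missing)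

-- the `while "-c" in remaining or "--config" in remaining:` loop;
-- `del remaining[index:index+2]` is `take idx ++ drop (idx+2)` (exact for this nonnegative in-range idx).
-- The fuel argument is only a totality guard: every iteration shortens `r` by two, and loopA
-- hands the loop r.length + 1 fuel, so the 0-fuel arm is never reached.
def loopAF : Nat → List String → List String → Option (List String × List String)
  | 0, _, _ => none
  | fuel + 1, g, r =>
    if "-c" ∈ r ∨ "--config" ∈ r then
      let flag := if "-c" ∈ r then "-c" else "--config"
      match PySem.List.index? r flag with
      | none => none                                         -- unreachable: flag ∈ r
      | some idx =>
        match PySem.List.pyGet? r ((idx : Int) + 1) with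
        | none => none                                       -- SystemExit: missing value for flag
        | some v => loopAF fuel (g ++ [flag, v]) (r.take idx ++ r.drop (idx + 2))
    else some (g, r)

def loopA (g r : List String) : Option (List String × List String) :=
  loopAF (r.length + 1) g r

def dispatchA (g : List String) (head : String) (tail : List String) : Option (List String) :=
  if head = "account-bind-start" then
    (pyPopValue tail "--display-name").bind fun v =>
      some (g ++ ["bind", "start", "--name", v])
  else if head = "account-bind-complete" then
    (pyPopValue tail "--account-id").bind fun a =>
    (pyPopValue tail "--auth-code").bind fun c =>
      some (g ++ ["bind", "complete", "--account-id", a, "--code", c])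
  else if head = "account-check" then
    (pyPopValue tail "--account-id").bind fun a =>
      some (g ++ ["account", "user", "--account-id", a])
  else if head = "account-list" then some (g ++ ["account", "list"])
  else if head = "upload-share" then
    (pyPopValue tail "--local-path").bind fun lp =>
    (pyPopValue tail "--remote-path").bind fun rp =>
    (pyPopValue tail "--account-id").bind fun a =>
      some (g ++ ["upload", lp, rp, "--account-id", a])
  else if head = "transfer-share" then
    (pyPopValue tail "--share-url").bind fun su =>
    (if "--save-path" ∈ tail then pyPopValue tail "--save-path" else some "").bind fun sp =>
    (pyPopValue tail "--account-id").bind fun a =>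
    (if "--password" ∈ tail then
        (pyPopValue tail "--password").bind fun p =>
          some (["transfer", su, sp, "--account-id", a] ++ ["--pwd", p])
      else some ["transfer", su, sp, "--account-id", a]).bind fun norm =>
    some (g ++ norm.filter (fun item => item ≠ ""))
  else if head = "serve-api" then
    (if "--host" ∈ tail then
        (pyPopValue tail "--host").bind fun h => some (["api", "serve"] ++ ["--host", h])
      else some ["api", "serve"]).bind fun n1 =>
    (if "--port" ∈ tail then
        (pyPopValue tail "--port").bind fun p => some (n1 ++ ["--port", p])
      else some n1).bind fun n2 =>
    some (g ++ n2)
  else some (g ++ (head :: tail))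

def runA (argv : List String) : Option (List String) :=
  if argv = [] then some argv
  else
    match loopA [] argv with
    | none => none
    | some (g, remaining) =>
      match remaining with
      | [] => none                  -- `head, *tail = remaining` raises ValueError on []
      | head :: tail => dispatchA g head tail

def normalize_legacy_argv (argv : List String) : List String :=
  (runA argv).getD []               -- the .getD [] value is never used on Pre_ (A returns ↔ some)

-- ===== PORT B =====

-- _split_flag(args, flag): one forward pass collecting flag/value pairs and the rest
def scanFlag (flag : String) (args : List String) : Option (List String × List String) :=
  match args with
  | [] => some ([], [])
  | x :: xs =>
    if x = flag then
      match xs with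
      | [] => none                  -- SystemExit: missing value for flag
      | v :: rest => (scanFlag flag rest).map fun pr => (flag :: v :: pr.1, pr.2)
    else
      (scanFlag flag xs).map fun pr => (pr.1, x :: pr.2)
termination_by args.length
decreasing_by all_goals simp

-- _value_after(args, flag)
def valueAfter (flag : String) (args : List String) : Option String :=
  match args with
  | [] => none
  | x :: xs => if x = flag then xs.head? else valueAfter flag xs

-- the spec-token tuples of _SPECS: ("lit",s) / ("req",f) / ("optval",f) / ("optpair",out,src)
inductive SpecTok where
  | lit : String → SpecTok
  | req : String → SpecTok
  | optVal : String → SpecTok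
  | optPair : String → String → SpecTok
deriving DecidableEq, Repr

-- _SPECS
def specsB : PySem.Dict String (List SpecTok × Bool) :=
  PySem.Dict.mk
    [ ("account-bind-start",
        ([.lit "bind", .lit "start", .lit "--name", .req "--display-name"], false)),
      ("account-bind-complete",
        ([.lit "bind", .lit "complete", .lit "--account-id", .req "--account-id",
          .lit "--code", .req "--auth-code"], false)),
      ("account-check",
        ([.lit "account", .lit "user", .lit "--account-id", .req "--account-id"], false)),
      ("account-list", ([.lit "account", .lit "list"], false)),
      ("upload-share",
        ([.lit "upload", .req "--local-path", .req "--remote-path",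
          .lit "--account-id", .req "--account-id"], false)),
      ("transfer-share",
        ([.lit "transfer", .req "--share-url", .optVal "--save-path",
          .lit "--account-id", .req "--account-id", .optPair "--pwd" "--password"], true)),
      ("serve-api",
        ([.lit "api", .lit "serve", .optPair "--host" "--host",
          .optPair "--port" "--port"], false)) ]

-- _render(tail, tok)
def renderTokB (tail : List String) : SpecTok → Option (List String)
  | .lit s => some [s]
  | .req f => (valueAfter f tail).map fun v => [v]
  | .optVal f => if f ∈ tail then (valueAfter f tail).map fun v => [v] else some []
  | .optPair o s => if s ∈ tail then (valueAfter s tail).map fun v => [o, v] else some []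

-- the flattening comprehension `[x for tok in tokens for x in _render(tail, tok)]`
def renderSpecB (tail : List String) : List SpecTok → Option (List String)
  | [] => some []
  | t :: ts => (renderTokB tail t).bind fun vs => (renderSpecB tail ts).map fun rest => vs ++ rest

def runB (argv : List String) : Option (List String) :=
  if argv = [] then some argv
  else
    (scanFlag "-c" argv).bind fun cpr =>
    (scanFlag "--config" cpr.2).bind fun gpr =>
    match gpr.2 with
    | [] => none                    -- SystemExit("missing command")
    | head :: tail =>
      match PySem.Dict.get? specsB head with
      | none => some (cpr.1 ++ gpr.1 ++ (head :: tail))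
      | some (toks, filt) =>
        (renderSpecB tail toks).map fun items =>
          cpr.1 ++ gpr.1 ++ (if filt then items.filter (fun x => x ≠ "") else items)

def normalize_legacy_argv_alt (argv : List String) : List String :=
  (runB argv).getD []

-- ===== PRECONDITION & SPEC =====
-- Pre_ holds exactly on the inputs where the Python A RETURNS (it raises SystemExit when a
-- "-c"/"--config" flag position has no following value or a legacy subcommand lacks a required
-- flag value, and ValueError when nothing but config pairs remains): every occurrence of the two
-- global flags (read left to right, a flag's value is never itself read as a flag) must be
-- followed by a value, a command token must remain, and the flags the selected subcommand reads
-- must occur with a following value.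

-- every flag occurrence (in flag position, reading left to right) has a following value
def flagWellFormed (flag : String) : List String → Bool
  | [] => true
  | x :: xs =>
    if x = flag then
      match xs with
      | [] => false
      | _ :: rest => flagWellFormed flag rest
    else flagWellFormed flag xs

-- args with the flag/value pairs removed (meaningful when flagWellFormed holds)
def withoutFlag (flag : String) : List String → List String
  | [] => []
  | x :: xs =>
    if x = flag then
      match xs with
      | [] => []
      | _ :: rest => withoutFlag flag rest
    else x :: withoutFlag flag xs

-- flag occurs and its first occurrence has a following element
def hasFlagValue (args : List String) (flag : String) : Bool := flag ∈ args.dropLast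

def preCheck (argv : List String) : Bool :=
  argv = [] ||
  (flagWellFormed "-c" argv &&
    let r1 := withoutFlag "-c" argv
    flagWellFormed "--config" r1 &&
      match withoutFlag "--config" r1 with
      | [] => false
      | head :: tail =>
        if head = "account-bind-start" then hasFlagValue tail "--display-name"
        else if head = "account-bind-complete" then
          hasFlagValue tail "--account-id" && hasFlagValue tail "--auth-code"
        else if head = "account-check" then hasFlagValue tail "--account-id"
        else if head = "upload-share" then
          hasFlagValue tail "--local-path" && hasFlagValue tail "--remote-path" &&
            hasFlagValue tail "--account-id"
        else if head = "transfer-share" then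
          hasFlagValue tail "--share-url" &&
            (!("--save-path" ∈ tail) || hasFlagValue tail "--save-path") &&
            hasFlagValue tail "--account-id" &&
            (!("--password" ∈ tail) || hasFlagValue tail "--password")
        else if head = "serve-api" then
          (!("--host" ∈ tail) || hasFlagValue tail "--host") &&
            (!("--port" ∈ tail) || hasFlagValue tail "--port")
        else true)

def Pre_normalize_legacy_argv (argv : List String) : Prop := preCheck argv = true
instance (argv : List String) : Decidable (Pre_normalize_legacy_argv argv) := by
  unfold Pre_normalize_legacy_argv; infer_instance

def pvWitness_normalize_legacy_argv : List String :=
  ["-c", "cfg.toml", "transfer-share", "--share-url", "http://u", "--account-id", "7"]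

def Spec_normalize_legacy_argv (argv : List String) (out : List String) : Prop :=
  out = normalize_legacy_argv_alt argv
instance (argv : List String) (out : List String) : Decidable (Spec_normalize_legacy_argv argv out) := by
  unfold Spec_normalize_legacy_argv; infer_instance

-- ===== CLAIM (what is proved, stated in full; the proofs are below) =====
def Claim_equal_normalize_legacy_argv : Prop :=
  ∀ (argv : List String), Dom_normalize_legacy_argv argv →
    Pre_normalize_legacy_argv argv →
      Spec_normalize_legacy_argv argv (normalize_legacy_argv argv)

-- ===== LEMMAS AND PROOFS =====

theorem pop_eq_valueAfter (tail : List String) (flag : String) :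
    pyPopValue tail flag = valueAfter flag tail := by
  induction tail with
  | nil => simp [pyPopValue, valueAfter]
  | cons x xs ih =>
    rw [pyPopValue]
    simp only [valueAfter]
    by_cases hx : x = flag
    · subst hx
      rw [if_pos (List.mem_cons_self), if_pos rfl, PySem.List.index?_cons_self]
      show PySem.List.pyGet? (x :: xs) (((0 : Nat) : Int) + 1) = xs.head?
      rw [show (((0 : Nat) : Int) + 1) = ((1 : Nat) : Int) by norm_num, PySem.List.pyGet?_natCast]
      cases xs <;> simp
    · rw [if_neg hx, ← ih, pyPopValue]
      by_cases hm : flag ∈ xs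
      · rw [if_pos (by simp [hm]), if_pos hm, PySem.List.index?_cons_of_ne xs hx]
        cases hidx : PySem.List.index? xs flag with
        | none => rw [PySem.List.index?_eq_none_iff] at hidx; exact absurd hm hidx
        | some k =>
          simp only [Option.map_some]
          rw [PySem.List.pyGet?_cons_succ]
          norm_cast
      · rw [if_neg (by simp [hm]; exact fun h => hx h.symm), if_neg hm]

theorem scanFlag_nil (flag : String) : scanFlag flag [] = some ([], []) := by
  rw [scanFlag.eq_def]

theorem scanFlag_cons (flag x : String) (xs : List String) :
    scanFlag flag (x :: xs) =
      if x = flag then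
        match xs with
        | [] => none
        | v :: rest => (scanFlag flag rest).map fun pr => (flag :: v :: pr.1, pr.2)
      else (scanFlag flag xs).map fun pr => (pr.1, x :: pr.2) := by
  rw [scanFlag.eq_def]

theorem scanFlag_not_mem (flag : String) (l : List String) (h : flag ∉ l) :
    scanFlag flag l = some ([], l) := by
  induction l with
  | nil => simp [scanFlag]
  | cons x xs ih =>
    have hx : x ≠ flag := by rintro rfl; exact h (by simp)
    have hxs : flag ∉ xs := fun hm => h (by simp [hm])
    rw [scanFlag_cons]; simp [hx, ih hxs]

theorem scanFlag_append_not_mem (flag : String) (pre l : List String) (h : flag ∉ pre) :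
    scanFlag flag (pre ++ l) = (scanFlag flag l).map fun pr => (pr.1, pre ++ pr.2) := by
  induction pre with
  | nil =>
    simp only [List.nil_append]
    cases scanFlag flag l with
    | none => simp
    | some pr => simp
  | cons x xs ih =>
    have hx : x ≠ flag := by rintro rfl; exact h (by simp)
    have hxs : flag ∉ xs := fun hm => h (by simp [hm])
    rw [List.cons_append, scanFlag_cons]
    simp only [if_neg hx, ih hxs]
    cases scanFlag flag l with
    | none => simp
    | some pr => simp

-- characterisation of A's extraction loop by B's two forward scans
theorem loopA_eq_scans (n : Nat) : ∀ (r g : List String), r.length ≤ n →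
    loopAF (n + 1) g r =
      (scanFlag "-c" r).bind fun cpr =>
      (scanFlag "--config" cpr.2).bind fun gpr =>
      some (g ++ cpr.1 ++ gpr.1, gpr.2) := by
  induction n with
  | zero =>
    intro r g hr
    have : r = [] := List.eq_nil_of_length_eq_zero (Nat.le_zero.mp hr)
    subst this
    simp [loopAF, scanFlag_nil]
  | succ n ih =>
    intro r g hr
    by_cases hc : "-c" ∈ r
    · -- phase 1: the loop removes the first "-c" pair
      obtain ⟨k, hk⟩ := Option.isSome_iff_exists.mp
        ((PySem.List.index?_isSome_iff r "-c").mpr hc)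
      obtain ⟨pre, suf, hdecomp, hklen, hpre⟩ := (PySem.List.index?_eq_some_iff r "-c" k).mp hk
      rw [show n + 1 + 1 = (n + 1) + 1 from rfl, loopAF]
      simp only [if_pos (Or.inl hc), if_pos hc, hk]
      cases suf with
      | nil =>
        -- trailing "-c": both sides raise
        have hnone : PySem.List.pyGet? r ((k : Int) + 1) = none := by
          rw [show ((k : Int) + 1) = ((k + 1 : Nat) : Int) by push_cast; ring,
            PySem.List.pyGet?_natCast]
          apply List.getElem?_eq_none
          simp [hdecomp, ← hklen]
        simp only [hnone]
        rw [hdecomp, scanFlag_append_not_mem _ _ _ hpre]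
        rw [scanFlag_cons, if_pos rfl]
        simp
      | cons v rest =>
        have hsome : PySem.List.pyGet? r ((k : Int) + 1) = some v := by
          rw [hdecomp, ← hklen,
            show ((pre.length : Int) + 1) = ((pre.length : Int) + ((1 : Nat) : Int)) by norm_num,
            PySem.List.pyGet?_append_right]
          simp
        simp only [hsome]
        have htake : r.take k = pre := by rw [hdecomp, ← hklen]; exact List.take_left
        have hdrop : r.drop (k + 2) = rest := by
          rw [hdecomp, ← hklen]
          have := List.drop_length_add_append (l₁ := pre) (l₂ := "-c" :: v :: rest) (i := 2)
          simpa using this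
        rw [htake, hdrop]
        have hlen : (pre ++ rest).length ≤ n := by
          have : r.length = pre.length + 2 + rest.length := by simp [hdecomp]; omega
          simp only [List.length_append]; omega
        rw [ih (pre ++ rest) (g ++ ["-c", v]) hlen]
        rw [hdecomp]
        rw [scanFlag_append_not_mem "-c" pre ("-c" :: v :: rest) hpre]
        rw [scanFlag_cons "-c" "-c" (v :: rest), if_pos rfl]
        rw [scanFlag_append_not_mem "-c" pre rest hpre]
        cases hrest : scanFlag "-c" rest with
        | none => simp [hrest]
        | some pr =>
          cases hcfg : scanFlag "--config" (pre ++ pr.2) with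
          | none => simp [hrest, hcfg]
          | some gpr => simp [hrest, hcfg]
    · by_cases hg : "--config" ∈ r
      · -- phase 2: no "-c" left, the loop removes the first "--config" pair
        obtain ⟨k, hk⟩ := Option.isSome_iff_exists.mp
          ((PySem.List.index?_isSome_iff r "--config").mpr hg)
        obtain ⟨pre, suf, hdecomp, hklen, hpre⟩ :=
          (PySem.List.index?_eq_some_iff r "--config" k).mp hk
        rw [show n + 1 + 1 = (n + 1) + 1 from rfl, loopAF]
        simp only [if_pos (Or.inr hg), if_neg hc, hk]
        rw [scanFlag_not_mem _ _ hc]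
        simp only [Option.bind_some]
        cases suf with
        | nil =>
          have hnone : PySem.List.pyGet? r ((k : Int) + 1) = none := by
            rw [show ((k : Int) + 1) = ((k + 1 : Nat) : Int) by push_cast; ring,
              PySem.List.pyGet?_natCast]
            apply List.getElem?_eq_none
            simp [hdecomp, ← hklen]
          simp only [hnone]
          rw [hdecomp, scanFlag_append_not_mem _ _ _ hpre, scanFlag_cons, if_pos rfl]
          simp
        | cons v rest =>
          have hsome : PySem.List.pyGet? r ((k : Int) + 1) = some v := by
            rw [hdecomp, ← hklen,
              show ((pre.length : Int) + 1) = ((pre.length : Int) + ((1 : Nat) : Int)) by norm_num,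
              PySem.List.pyGet?_append_right]
            simp
          simp only [hsome]
          have htake : r.take k = pre := by rw [hdecomp, ← hklen]; exact List.take_left
          have hdrop : r.drop (k + 2) = rest := by
            rw [hdecomp, ← hklen]
            have := List.drop_length_add_append (l₁ := pre) (l₂ := "--config" :: v :: rest) (i := 2)
            simpa using this
          rw [htake, hdrop]
          have hlen : (pre ++ rest).length ≤ n := by
            have : r.length = pre.length + 2 + rest.length := by simp [hdecomp]; omega
            simp only [List.length_append]; omega
          rw [ih (pre ++ rest) (g ++ ["--config", v]) hlen]
          rw [hdecomp]
          have hcsub : "-c" ∉ pre ++ rest := by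
            intro hm
            apply hc
            rw [hdecomp]
            rcases List.mem_append.mp hm with h1 | h1
            · exact List.mem_append.mpr (Or.inl h1)
            · exact List.mem_append.mpr (Or.inr (by simp [h1]))
          rw [scanFlag_not_mem _ _ hcsub]
          simp only [Option.bind_some]
          rw [scanFlag_append_not_mem "--config" pre ("--config" :: v :: rest) hpre]
          rw [scanFlag_cons "--config" "--config" (v :: rest), if_pos rfl]
          rw [scanFlag_append_not_mem "--config" pre rest hpre]
          cases hrest : scanFlag "--config" rest with
          | none => simp [hrest]
          | some pr => simp [hrest]
      · rw [show n + 1 + 1 = (n + 1) + 1 from rfl, loopAF]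
        simp only [if_neg (by tauto : ¬("-c" ∈ r ∨ "--config" ∈ r))]
        simp [scanFlag_not_mem _ _ hc, scanFlag_not_mem _ _ hg]

-- B's interpreted spec for each known head equals A's hand-written branch
theorem dispatch_eq (g : List String) (head : String) (tail : List String) :
    dispatchA g head tail =
      (match PySem.Dict.get? specsB head with
        | none => some (g ++ (head :: tail))
        | some (toks, filt) =>
          (renderSpecB tail toks).map fun items =>
            g ++ (if filt then items.filter (fun x => x ≠ "") else items)) := by
  rw [dispatchA]
  by_cases h1 : head = "account-bind-start"
  · subst h1
    have hspec : PySem.Dict.get? specsB "account-bind-start" =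
        some ([.lit "bind", .lit "start", .lit "--name", .req "--display-name"], false) := rfl
    simp only [if_pos rfl, pop_eq_valueAfter, hspec, renderSpecB, renderTokB]
    cases hv : valueAfter "--display-name" tail <;> simp [hv]
  by_cases h2 : head = "account-bind-complete"
  · subst h2
    have hspec : PySem.Dict.get? specsB "account-bind-complete" =
        some ([.lit "bind", .lit "complete", .lit "--account-id", .req "--account-id",
          .lit "--code", .req "--auth-code"], false) := rfl
    simp only [if_neg h1, if_pos rfl, pop_eq_valueAfter, hspec, renderSpecB, renderTokB]
    cases ha : valueAfter "--account-id" tail <;>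
      cases hb : valueAfter "--auth-code" tail <;> simp [ha, hb]
  by_cases h3 : head = "account-check"
  · subst h3
    have hspec : PySem.Dict.get? specsB "account-check" =
        some ([.lit "account", .lit "user", .lit "--account-id", .req "--account-id"], false) := rfl
    simp only [if_neg h1, if_neg h2, if_pos rfl, pop_eq_valueAfter, hspec, renderSpecB, renderTokB]
    cases ha : valueAfter "--account-id" tail <;> simp [ha]
  by_cases h4 : head = "account-list"
  · subst h4
    have hspec : PySem.Dict.get? specsB "account-list" =
        some ([.lit "account", .lit "list"], false) := rfl
    simp only [if_neg h1, if_neg h2, if_neg h3, if_pos rfl, hspec]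
    simp [renderSpecB, renderTokB]
  by_cases h5 : head = "upload-share"
  · subst h5
    have hspec : PySem.Dict.get? specsB "upload-share" =
        some ([.lit "upload", .req "--local-path", .req "--remote-path",
          .lit "--account-id", .req "--account-id"], false) := rfl
    simp only [if_neg h1, if_neg h2, if_neg h3, if_neg h4, if_pos rfl, pop_eq_valueAfter, hspec,
      renderSpecB, renderTokB]
    cases hl : valueAfter "--local-path" tail <;>
      cases hr : valueAfter "--remote-path" tail <;>
      cases ha : valueAfter "--account-id" tail <;> simp [hl, hr, ha]
  by_cases h6 : head = "transfer-share"
  · subst h6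
    have hspec : PySem.Dict.get? specsB "transfer-share" =
        some ([.lit "transfer", .req "--share-url", .optVal "--save-path",
          .lit "--account-id", .req "--account-id", .optPair "--pwd" "--password"], true) := rfl
    simp only [if_neg h1, if_neg h2, if_neg h3, if_neg h4, if_neg h5, if_pos rfl,
      pop_eq_valueAfter, hspec, renderSpecB, renderTokB]
    cases valueAfter "--share-url" tail with
    | none => simp
    | some su =>
      simp only [Option.map_some, Option.bind_some]
      by_cases hsp : "--save-path" ∈ tail
      · simp only [if_pos hsp]
        cases valueAfter "--save-path" tail with
        | none => simp
        | some sp =>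
          simp only [Option.map_some, Option.bind_some]
          cases valueAfter "--account-id" tail with
          | none => simp
          | some a =>
            simp only [Option.map_some, Option.bind_some]
            by_cases hpw : "--password" ∈ tail
            · simp only [if_pos hpw]
              cases valueAfter "--password" tail <;> simp [List.filter_append]
            · simp [if_neg hpw, List.filter_append]
      · simp only [if_neg hsp, Option.bind_some]
        cases valueAfter "--account-id" tail with
        | none => simp
        | some a =>
          simp only [Option.map_some, Option.bind_some]
          by_cases hpw : "--password" ∈ tail
          · simp only [if_pos hpw]
            cases valueAfter "--password" tail <;> simp [List.filter_append, List.filter]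
          · simp [if_neg hpw, List.filter_append, List.filter]
  by_cases h7 : head = "serve-api"
  · subst h7
    have hspec : PySem.Dict.get? specsB "serve-api" =
        some ([.lit "api", .lit "serve", .optPair "--host" "--host",
          .optPair "--port" "--port"], false) := rfl
    simp only [if_neg h1, if_neg h2, if_neg h3, if_neg h4, if_neg h5, if_neg h6, if_pos rfl,
      pop_eq_valueAfter, hspec, renderSpecB, renderTokB]
    by_cases hh : "--host" ∈ tail
    · simp only [if_pos hh]
      cases valueAfter "--host" tail with
      | none => simp
      | some hv =>
        simp only [Option.map_some, Option.bind_some]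
        by_cases hp : "--port" ∈ tail
        · simp only [if_pos hp]
          cases valueAfter "--port" tail <;> simp
        · simp [if_neg hp]
    · simp only [if_neg hh, Option.bind_some]
      by_cases hp : "--port" ∈ tail
      · simp only [if_pos hp]
        cases valueAfter "--port" tail <;> simp
      · simp [if_neg hp]
  have hget : PySem.Dict.get? specsB head = none := by
    rw [specsB, PySem.Dict.get?_mk_cons]; simp only [beq_iff_eq]
    rw [if_neg fun h => h1 h.symm, PySem.Dict.get?_mk_cons]; simp only [beq_iff_eq]
    rw [if_neg fun h => h2 h.symm, PySem.Dict.get?_mk_cons]; simp only [beq_iff_eq]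
    rw [if_neg fun h => h3 h.symm, PySem.Dict.get?_mk_cons]; simp only [beq_iff_eq]
    rw [if_neg fun h => h4 h.symm, PySem.Dict.get?_mk_cons]; simp only [beq_iff_eq]
    rw [if_neg fun h => h5 h.symm, PySem.Dict.get?_mk_cons]; simp only [beq_iff_eq]
    rw [if_neg fun h => h6 h.symm, PySem.Dict.get?_mk_cons]; simp only [beq_iff_eq]
    rw [if_neg fun h => h7 h.symm]; rfl
  simp [hget, if_neg h1, if_neg h2, if_neg h3, if_neg h4, if_neg h5, if_neg h6, if_neg h7]

theorem runA_eq_runB (argv : List String) : runA argv = runB argv := by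
  rw [runA, runB]
  by_cases hnil : argv = []
  · simp [hnil]
  simp only [if_neg hnil]
  rw [loopA, loopA_eq_scans argv.length argv [] (le_refl _)]
  cases scanFlag "-c" argv with
  | none => simp
  | some cpr =>
    simp only [Option.bind_some]
    cases scanFlag "--config" cpr.2 with
    | none => simp
    | some gpr =>
      simp only [Option.bind_some, List.nil_append]
      cases gpr.2 with
      | nil => rfl
      | cons head tail => exact dispatch_eq _ head tail

-- ===== VERDICT (by name: the statement is the Claim_ definition above) =====
theorem normalize_legacy_argv_spec : Claim_equal_normalize_legacy_argv := by
  intro argv _ _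
  unfold Spec_normalize_legacy_argv normalize_legacy_argv normalize_legacy_argv_alt
  rw [runA_eq_runB]
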